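-- pv_equiv track=rewrite | github.com/allenpeng0705/HomeClaw | base/workspace.py | _sanitize_friend_id
-- ===== SOURCE A (Python) =====
-- from typing import Dict, List, Optional
--
-- def _sanitize_friend_id(friend_id: Optional[str]) -> str:
--     """Normalize friend_id for paths; default HomeClaw when empty/None. Sanitize for file paths. Never raises."""
--     try:
--         if friend_id is None:
--             return "HomeClaw"
--         s = str(friend_id).strip()
--         if not s:
--             return "HomeClaw"
--         for c in r'/\:*?"<>|':
--             s = s.replace(c, "_")
--         return s or "HomeClaw"
--     except Exception:
--         return "HomeClaw"
-- ===== SOURCE B (Python) =====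
-- def _sanitize_friend_id(friend_id):
--     """Normalize friend_id for paths; default HomeClaw when empty/None."""
--     try:
--         if friend_id is None:
--             return "HomeClaw"
--         s = str(friend_id).strip()
--         if not s:
--             return "HomeClaw"
--         invalid = set('/\\:*?"<>|')
--         s = ''.join('_' if ch in invalid else ch for ch in s)
--         return s or "HomeClaw"
--     except Exception:
--         return "HomeClaw"
-- ===== Notes on version B (the rewrite author's own statement) =====
-- stated objective: simpler
-- what changed: Replaced the loop of nine full-string replace passes by a single character-wise pass that maps each invalid character (set membership) to an underscore.
import Mathlib
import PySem

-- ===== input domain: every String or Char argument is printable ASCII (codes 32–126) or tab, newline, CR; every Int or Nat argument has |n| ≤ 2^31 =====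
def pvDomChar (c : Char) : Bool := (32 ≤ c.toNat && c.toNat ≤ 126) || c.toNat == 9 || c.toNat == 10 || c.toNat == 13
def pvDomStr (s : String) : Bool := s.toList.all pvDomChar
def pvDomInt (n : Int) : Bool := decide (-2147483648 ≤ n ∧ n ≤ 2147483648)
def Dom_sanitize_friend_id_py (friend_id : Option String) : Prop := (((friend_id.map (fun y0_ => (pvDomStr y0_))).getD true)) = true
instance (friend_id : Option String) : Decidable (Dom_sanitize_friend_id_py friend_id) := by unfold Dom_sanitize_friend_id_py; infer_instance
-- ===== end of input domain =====

-- B replaces A's nine full-string replace passes by a single map over the characters (simpler, one pass).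


-- ===== PORT A =====
-- the loop `for c in r'/\:*?"<>|': s = s.replace(c, "_")`, transliterated as a foldl over
-- the same nine characters, each step a full-string single-character replace
def sanitize_friend_id_py (friend_id : Option String) : String :=
  match friend_id with
  | none => "HomeClaw"
  | some fid =>
    let s := PySem.Chars.strip fid.toList
    if s.isEmpty then "HomeClaw"
    else
      let s := ['/', '\\', ':', '*', '?', '"', '<', '>', '|'].foldl
        (fun s c => PySem.Chars.replace s [c] ['_']) s
      if s.isEmpty then "HomeClaw" else String.ofList s

-- ===== PORT B =====
-- invalid = set('/\:*?"<>|')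
def pvInvalidSet : PySem.Set Char := PySem.Set.ofList ['/', '\\', ':', '*', '?', '"', '<', '>', '|']

-- one pass: ''.join('_' if ch in invalid else ch for ch in s)
def sanitize_friend_id_py_alt (friend_id : Option String) : String :=
  match friend_id with
  | none => "HomeClaw"
  | some fid =>
    let s := PySem.Chars.strip fid.toList
    if s.isEmpty then "HomeClaw"
    else
      let s := s.map (fun ch => if ch ∈ pvInvalidSet then '_' else ch)
      if s.isEmpty then "HomeClaw" else String.ofList s

-- ===== PRECONDITION & SPEC =====
def Spec_sanitize_friend_id_py (friend_id : Option String) (out : String) : Prop := out = sanitize_friend_id_py_alt friend_id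
instance (friend_id : Option String) (out : String) : Decidable (Spec_sanitize_friend_id_py friend_id out) := by unfold Spec_sanitize_friend_id_py; infer_instance

-- ===== CLAIM (what is proved, stated in full; the proofs are below) =====
def Claim_equal_sanitize_friend_id_py : Prop := ∀ (friend_id : Option String), Dom_sanitize_friend_id_py friend_id → Spec_sanitize_friend_id_py friend_id (sanitize_friend_id_py friend_id)

-- ===== LEMMAS AND PROOFS =====

-- replacing a single character by '_' is a pointwise map
theorem replace_go_single (c : Char) (l acc : List Char) (fuel : Nat) (h : l.length ≤ fuel) :
    PySem.Chars.replace.go [c] ['_'] fuel l acc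
      = acc.reverse ++ l.map (fun ch => if ch = c then '_' else ch) := by
  induction l generalizing fuel acc with
  | nil => cases fuel <;> simp [PySem.Chars.replace.go]
  | cons hd tl ih =>
    cases fuel with
    | zero => simp at h
    | succ n =>
      simp only [PySem.Chars.replace.go, List.isPrefixOf]
      by_cases hc : hd = c
      · simp [hc, ih _ _ (by simpa using h)]
      · simp [hc, Ne.symm hc, ih _ _ (by simpa using h)]

theorem replace_single (c : Char) (l : List Char) :
    PySem.Chars.replace l [c] ['_'] = l.map (fun ch => if ch = c then '_' else ch) := by
  simp [PySem.Chars.replace, replace_go_single c l [] l.length le_rfl]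

theorem pvInvalidSet_eq : pvInvalidSet = ['/', '\\', ':', '*', '?', '"', '<', '>', '|'] := by decide

theorem mem_pvInvalidSet (ch : Char) :
    ch ∈ pvInvalidSet ↔ ch ∈ ['/', '\\', ':', '*', '?', '"', '<', '>', '|'] := by
  rw [pvInvalidSet_eq]

theorem nine_replaces_eq_map (s : List Char) :
    (['/', '\\', ':', '*', '?', '"', '<', '>', '|'].foldl
      (fun s c => PySem.Chars.replace s [c] ['_']) s)
    = s.map (fun ch => if ch ∈ pvInvalidSet then '_' else ch) := by
  simp only [List.foldl, replace_single, List.map_map]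
  refine List.map_congr_left (fun ch _ => ?_)
  by_cases h : ch ∈ pvInvalidSet
  · rw [if_pos h]
    have h' := (mem_pvInvalidSet ch).mp h
    simp only [List.mem_cons, List.not_mem_nil, or_false] at h'
    rcases h' with h'|h'|h'|h'|h'|h'|h'|h'|h' <;> subst h' <;> rfl
  · rw [if_neg h]
    have h' : ch ∉ (['/', '\\', ':', '*', '?', '"', '<', '>', '|'] : List Char) :=
      fun hm => h ((mem_pvInvalidSet ch).mpr hm)
    simp only [List.mem_cons, List.not_mem_nil, or_false, not_or] at h'
    obtain ⟨h1, h2, h3, h4, h5, h6, h7, h8, h9⟩ := h'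
    simp [h1, h2, h3, h4, h5, h6, h7, h8, h9]

-- ===== VERDICT (by name: the statement is the Claim_ definition above) =====
theorem sanitize_friend_id_py_spec : Claim_equal_sanitize_friend_id_py := by
  intro friend_id _
  unfold Spec_sanitize_friend_id_py sanitize_friend_id_py sanitize_friend_id_py_alt
  cases friend_id with
  | none => rfl
  | some fid => simp only [nine_replaces_eq_map]
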